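-- pv_equiv track=rewrite | github.com/pypi-data/pypi-mirror-366 | packages/klaude-code/klaude_code-0.1.19.tar.gz/klaude_code-0.1.19/src/klaudecode/tui/diff.py | calculate_diff_stats
-- ===== SOURCE A (Python) =====
-- from typing import List
--
-- def calculate_diff_stats(diff_lines: List[str]) -> tuple[int, int]:
--     additions = sum(
--         1
--         for line in diff_lines
--         if line.startswith("+") and not line.startswith("+++")
--     )
--     removals = sum(
--         1
--         for line in diff_lines
--         if line.startswith("-") and not line.startswith("---")
--     )
--     return additions, removals
-- ===== SOURCE B (Python) =====
-- def calculate_diff_stats(diff_lines):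
--     # Classification of a line depends only on its first three characters,
--     # so aggregate counts per 3-char prefix once, then classify each
--     # distinct prefix a single time.
--     freq = {}
--     for line in diff_lines:
--         p = line[:3]
--         freq[p] = freq.get(p, 0) + 1
--     additions = 0
--     removals = 0
--     for p, c in freq.items():
--         if p.startswith("+") and not p.startswith("+++"):
--             additions += c
--         elif p.startswith("-") and not p.startswith("---"):
--             removals += c
--     return additions, removals
-- ===== Notes on version B (the rewrite author's own statement) =====
-- stated objective: alternative
-- what changed: instead of A's two sum-comprehension scans over all lines, B builds a frequency dictionary of 3-character line prefixes in one pass (classification depends only on line[:3]) and then classifies each DISTINCT prefix once, summing its count into the matching counter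
import Mathlib
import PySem

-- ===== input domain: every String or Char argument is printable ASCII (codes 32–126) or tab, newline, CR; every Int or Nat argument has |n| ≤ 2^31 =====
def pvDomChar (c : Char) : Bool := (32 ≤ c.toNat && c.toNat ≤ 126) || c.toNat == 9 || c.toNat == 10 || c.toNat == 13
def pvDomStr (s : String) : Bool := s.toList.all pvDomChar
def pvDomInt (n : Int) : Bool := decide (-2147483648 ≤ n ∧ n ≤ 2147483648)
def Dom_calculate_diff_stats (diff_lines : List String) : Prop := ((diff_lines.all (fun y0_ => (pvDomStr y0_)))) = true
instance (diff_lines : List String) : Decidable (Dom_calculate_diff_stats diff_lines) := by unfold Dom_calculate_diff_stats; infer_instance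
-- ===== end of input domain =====

-- B replaces A's two per-line scans by a frequency dictionary keyed by line[:3]
-- (classification depends only on that prefix), classifying each distinct prefix once (objective: alternative).

-- ===== PORT A =====
def calculate_diff_stats (diff_lines : List String) : Int × Int :=
  let additions : Int := diff_lines.foldl
    (fun acc line =>
      if PySem.Str.startswith line "+" && !PySem.Str.startswith line "+++" then acc + 1 else acc) 0
  let removals : Int := diff_lines.foldl
    (fun acc line =>
      if PySem.Str.startswith line "-" && !PySem.Str.startswith line "---" then acc + 1 else acc) 0
  (additions, removals)

-- ===== PORT B =====
def calculate_diff_stats_alt (diff_lines : List String) : Int × Int :=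
  let freq : PySem.Dict String Int := diff_lines.foldl
    (fun d line =>
      d.insert (PySem.Str.slice line none (some 3))
        (d.getD (PySem.Str.slice line none (some 3)) 0 + 1))
    PySem.Dict.empty
  freq.items.foldl
    (fun (ar : Int × Int) pc =>
      if PySem.Str.startswith pc.1 "+" && !PySem.Str.startswith pc.1 "+++" then (ar.1 + pc.2, ar.2)
      else if PySem.Str.startswith pc.1 "-" && !PySem.Str.startswith pc.1 "---" then (ar.1, ar.2 + pc.2)
      else ar) (0, 0)

-- ===== PRECONDITION & SPEC =====
def Spec_calculate_diff_stats (diff_lines : List String) (out : Int × Int) : Prop := out = calculate_diff_stats_alt diff_lines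
instance (diff_lines : List String) (out : Int × Int) : Decidable (Spec_calculate_diff_stats diff_lines out) := by unfold Spec_calculate_diff_stats; infer_instance

-- ===== CLAIM (what is proved, stated in full; the proofs are below) =====
def Claim_equal_calculate_diff_stats : Prop := ∀ (diff_lines : List String), Dom_calculate_diff_stats diff_lines → Spec_calculate_diff_stats diff_lines (calculate_diff_stats diff_lines)

-- ===== LEMMAS AND PROOFS =====

-- a line cannot start with both "+" and "-"
theorem pv_not_both (line : String) (h : PySem.Str.startswith line "+" = true) :
    PySem.Str.startswith line "-" = false := by
  simp only [PySem.Str.startswith_eq] at h ⊢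
  rw [PySem.Chars.startswith_iff] at h
  by_contra hcon
  rw [Bool.not_eq_false, PySem.Chars.startswith_iff] at hcon
  obtain ⟨t1, h1⟩ := h
  obtain ⟨t2, h2⟩ := hcon
  rw [← h1] at h2
  simp at h2

-- startswith with a pattern of length ≤ 3 is decided by the first three characters
theorem pv_startswith_slice3 (line pat : String) (hp : pat.toList.length ≤ 3) :
    PySem.Str.startswith (PySem.Str.slice line none (some 3)) pat
      = PySem.Str.startswith line pat := by
  simp only [PySem.Str.startswith_eq, PySem.Str.toList_slice, PySem.Chars.slice]
  rw [show ((3:Int)) = ((3:Nat):Int) by norm_num, PySem.List.slice_to_natCast]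
  apply Bool.eq_iff_iff.mpr
  rw [PySem.Chars.startswith_iff, PySem.Chars.startswith_iff]
  constructor
  · intro h; exact h.trans (List.take_prefix _ _)
  · intro h; exact (List.prefix_take_iff.mpr ⟨h, hp⟩)

-- the B classification of a line equals the A classification, through line[:3]
theorem pv_testP_slice (line : String) :
    (PySem.Str.startswith (PySem.Str.slice line none (some 3)) "+"
       && !PySem.Str.startswith (PySem.Str.slice line none (some 3)) "+++")
      = (PySem.Str.startswith line "+" && !PySem.Str.startswith line "+++") := by
  rw [pv_startswith_slice3 line "+" (by decide), pv_startswith_slice3 line "+++" (by decide)]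

theorem pv_testM_slice (line : String) :
    (PySem.Str.startswith (PySem.Str.slice line none (some 3)) "-"
       && !PySem.Str.startswith (PySem.Str.slice line none (some 3)) "---")
      = (PySem.Str.startswith line "-" && !PySem.Str.startswith line "---") := by
  rw [pv_startswith_slice3 line "-" (by decide), pv_startswith_slice3 line "---" (by decide)]

-- the weighted pair fold over items splits into two independent weighted folds
theorem pv_fold_split (items : List (String × Int)) (a r : Int) :
    items.foldl
      (fun (ar : Int × Int) pc =>
        if PySem.Str.startswith pc.1 "+" && !PySem.Str.startswith pc.1 "+++" then (ar.1 + pc.2, ar.2)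
        else if PySem.Str.startswith pc.1 "-" && !PySem.Str.startswith pc.1 "---" then (ar.1, ar.2 + pc.2)
        else ar) (a, r)
    = (items.foldl
        (fun acc pc =>
          if PySem.Str.startswith pc.1 "+" && !PySem.Str.startswith pc.1 "+++" then acc + pc.2 else acc) a,
       items.foldl
        (fun acc pc =>
          if PySem.Str.startswith pc.1 "-" && !PySem.Str.startswith pc.1 "---" then acc + pc.2 else acc) r) := by
  induction items generalizing a r with
  | nil => rfl
  | cons pc rest ih =>
    simp only [List.foldl_cons]
    by_cases hp : (PySem.Str.startswith pc.1 "+" && !PySem.Str.startswith pc.1 "+++") = true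
    · have hm := pv_not_both pc.1 ((Bool.and_eq_true _ _).mp hp).1
      have hm' : (PySem.Str.startswith pc.1 "-" && !PySem.Str.startswith pc.1 "---") ≠ true := by
        rw [hm]; simp
      rw [if_pos hp, if_pos hp, if_neg hm', ih]
    · by_cases hr : (PySem.Str.startswith pc.1 "-" && !PySem.Str.startswith pc.1 "---") = true
      · rw [if_neg hp, if_neg hp, if_pos hr, if_pos hr, ih]
      · rw [if_neg hp, if_neg hp, if_neg hr, if_neg hr, ih]

-- summing counts over the distinct elements passing a test counts the test over the list
theorem pv_sum_counts (ps : List String) (p : String → Bool) :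
    (((PySem.Set.ofList ps).filter p).map (fun q => (ps.count q : Int))).sum
      = (ps.countP p : Int) := by
  have hperm : (PySem.Set.ofList ps).Perm ps.dedup := by
    apply (List.perm_ext_iff_of_nodup (PySem.Set.nodup_ofList ps) ps.nodup_dedup).mpr
    intro a; rw [PySem.Set.mem_ofList, List.mem_dedup]
  have h2 := ((hperm.filter p).map (fun q => ps.count q)).map (fun n : Nat => (n : Int))
  rw [show (fun q => ((ps.count q : Nat) : Int)) = (fun n : Nat => (n:Int)) ∘ (fun q => ps.count q) from rfl,
      ← List.map_map, h2.sum_eq, ← Nat.cast_list_sum]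
  exact_mod_cast congrArg (Nat.cast : Nat → Int) (List.sum_map_count_dedup_filter_eq_countP p ps)

-- one weighted side of B's classification fold equals the corresponding side of A
theorem pv_side (diff_lines : List String) (p : String → Bool) :
    ((PySem.Set.ofList (diff_lines.map (fun line => PySem.Str.slice line none (some 3)))).map
        (fun k => (k, ((diff_lines.map (fun line => PySem.Str.slice line none (some 3))).count k : Int)))).foldl
      (fun acc pc => if p pc.1 then acc + pc.2 else acc) 0
    = (0 : Int) + ((diff_lines.map (fun line => PySem.Str.slice line none (some 3))).countP p : Int) := by
  rw [List.foldl_map, PySem.List.foldl_if_eq_foldl_filter, PySem.List.foldl_add, pv_sum_counts]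

-- ===== VERDICT (by name: the statement is the Claim_ definition above) =====
theorem calculate_diff_stats_spec : Claim_equal_calculate_diff_stats := by
  intro diff_lines _
  unfold Spec_calculate_diff_stats calculate_diff_stats calculate_diff_stats_alt
  dsimp only
  rw [← List.foldl_map (f := fun line => PySem.Str.slice line none (some 3))
        (g := fun (d : PySem.Dict String Int) x => d.insert x (d.getD x 0 + 1)),
      PySem.Dict.foldl_insert_getD_add_one_eq_counter, PySem.Dict.items_counter,
      pv_fold_split,
      pv_side diff_lines (fun k => PySem.Str.startswith k "+" && !PySem.Str.startswith k "+++"),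
      pv_side diff_lines (fun k => PySem.Str.startswith k "-" && !PySem.Str.startswith k "---"),
      List.countP_map, List.countP_map,
      PySem.List.foldl_if_add_one, PySem.List.foldl_if_add_one]
  have hP : List.countP ((fun k => PySem.Str.startswith k "+" && !PySem.Str.startswith k "+++") ∘
      (fun line => PySem.Str.slice line none (some 3))) diff_lines
      = List.countP (fun line => PySem.Str.startswith line "+" && !PySem.Str.startswith line "+++") diff_lines := by
    apply List.countP_congr; intro x _
    simp only [Function.comp]; rw [pv_testP_slice]
  have hM : List.countP ((fun k => PySem.Str.startswith k "-" && !PySem.Str.startswith k "---") ∘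
      (fun line => PySem.Str.slice line none (some 3))) diff_lines
      = List.countP (fun line => PySem.Str.startswith line "-" && !PySem.Str.startswith line "---") diff_lines := by
    apply List.countP_congr; intro x _
    simp only [Function.comp]; rw [pv_testM_slice]
  rw [hP, hM]
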